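-- pv_equiv track=rewrite | github.com/kostakazakoff/SoftUni | Python Fundamentals/lists_advanced_exercise/softuni_course_planning.py | input_treatment
-- ===== SOURCE A (Python) =====
-- def input_treatment(course_list: str):
--     if len(course_list) == 0:
--         values = []
--     else:
--         values = course_list.split(', ')
--     pack = {'Lesson': None}
--     course_list = []
--     lessons = [x for x in values if len(x.split('-')) == 1]
--     exercises = [x for x in values if len(x.split('-')) == 2]
--     for lesson in lessons:
--         pack = pack.copy()
--         pack['Lesson'] = lesson
--         course_list.append(pack)
--     for exercise in exercises:
--         for i in range(len(course_list)):
--             course_list[i]['Exercise'] = exercise if course_list[i]['Lesson'] in exercise else 'None'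
--     return course_list
-- ===== SOURCE B (Python) =====
-- def input_treatment(course_list: str):
--     # Single pass: only the LAST exercise can survive A's repeated overwrites,
--     # so build each row once from exercises[-1].  O(L+E) instead of O(L*E).
--     values = course_list.split(', ') if course_list else []
--     lessons = [x for x in values if len(x.split('-')) == 1]
--     exercises = [x for x in values if len(x.split('-')) == 2]
--     if not exercises:
--         return [{'Lesson': lesson} for lesson in lessons]
--     last = exercises[-1]
--     return [{'Lesson': lesson,
--              'Exercise': last if lesson in last else 'None'}
--             for lesson in lessons]
-- ===== Notes on version B (the rewrite author's own statement) =====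
-- stated objective: faster
-- what changed: A rewrites the Exercise field of every lesson row once per exercise (nested loops); B observes that only the last exercise survives those overwrites and builds each row in a single pass from exercises[-1].
import Mathlib
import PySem

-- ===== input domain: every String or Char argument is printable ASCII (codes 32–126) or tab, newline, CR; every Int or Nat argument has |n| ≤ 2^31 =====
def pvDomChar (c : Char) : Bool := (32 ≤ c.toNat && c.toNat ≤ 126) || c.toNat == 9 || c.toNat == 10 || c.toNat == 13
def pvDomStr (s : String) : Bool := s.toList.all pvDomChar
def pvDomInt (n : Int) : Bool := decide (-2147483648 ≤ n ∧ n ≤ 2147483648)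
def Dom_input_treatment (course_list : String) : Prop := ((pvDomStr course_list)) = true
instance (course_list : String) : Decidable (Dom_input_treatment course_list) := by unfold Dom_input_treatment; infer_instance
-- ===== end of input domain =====

-- B replaces A's overwrite-every-row pass per exercise by one pass using only the last
-- exercise (only it survives the overwrites): O(L+E) instead of O(L*E).

-- ===== PORT A =====
-- literal port of Source A; Python's initial {'Lesson': None} is overwritten before every
-- append, so the never-observed None is modeled by the dead placeholder value "None";
-- course_list[i]['Lesson'] (key always present) is ported as getD with that placeholder.
def input_treatment (course_list : String) : List (List (String × String)) :=
  let values : List String :=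
    if PySem.Str.len course_list == 0 then [] else (PySem.Str.split? course_list ", ").getD []
  let pack0 : PySem.Dict String String := PySem.Dict.ofList [("Lesson", "None")]
  let lessons := values.filter (fun x => ((PySem.Str.split? x "-").getD []).length == 1)
  let exercises := values.filter (fun x => ((PySem.Str.split? x "-").getD []).length == 2)
  -- for lesson in lessons: pack = pack.copy(); pack['Lesson'] = lesson; append(pack)
  let st := lessons.foldl
    (fun (st : PySem.Dict String String × List (PySem.Dict String String)) lesson =>
      let pack := st.1.insert "Lesson" lesson
      (pack, st.2 ++ [pack]))
    (pack0, ([] : List (PySem.Dict String String)))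
  -- for exercise in exercises: for i in range(len(course_list)): in-place update of
  -- every index in order, rendered as a map over the list
  let cl := exercises.foldl
    (fun cl exercise =>
      cl.map (fun d => d.insert "Exercise"
        (if PySem.Str.isIn (d.getD "Lesson" "None") exercise then exercise else "None")))
    st.2
  cl.map (fun d => d.items)

-- ===== PORT B =====
def input_treatment_alt (course_list : String) : List (List (String × String)) :=
  let values : List String :=
    if PySem.Str.len course_list == 0 then [] else (PySem.Str.split? course_list ", ").getD []
  let lessons := values.filter (fun x => ((PySem.Str.split? x "-").getD []).length == 1)
  let exercises := values.filter (fun x => ((PySem.Str.split? x "-").getD []).length == 2)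
  match exercises.getLast? with
  | none => lessons.map (fun lesson => [("Lesson", lesson)])
  | some last => lessons.map (fun lesson =>
      [("Lesson", lesson),
       ("Exercise", if PySem.Str.isIn lesson last then last else "None")])

-- ===== PRECONDITION & SPEC =====
def Spec_input_treatment (course_list : String) (out : List (List (String × String))) : Prop := out = input_treatment_alt course_list
instance (course_list : String) (out : List (List (String × String))) : Decidable (Spec_input_treatment course_list out) := by unfold Spec_input_treatment; infer_instance

-- ===== CLAIM (what is proved, stated in full; the proofs are below) =====
def Claim_equal_input_treatment : Prop := ∀ (course_list : String), Dom_input_treatment course_list → Spec_input_treatment course_list (input_treatment course_list)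

-- ===== LEMMAS AND PROOFS =====

-- the single-lesson dict built by A's first loop
def pvRow (lesson : String) : PySem.Dict String String :=
  PySem.Dict.ofList [("Lesson", lesson)]

-- A's per-exercise update of one row
def pvUpd (exercise : String) (d : PySem.Dict String String) : PySem.Dict String String :=
  d.insert "Exercise"
    (if PySem.Str.isIn (d.getD "Lesson" "None") exercise then exercise else "None")

theorem pvRow_eq (a l : String) :
    (PySem.Dict.ofList [("Lesson", a)]).insert "Lesson" l = pvRow l := by
  apply PySem.Dict.ext
  simp [PySem.Dict.ofList, PySem.Dict.insert, pvRow, PySem.Dict.contains,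
    PySem.Dict.update, PySem.Dict.empty]

theorem pvFirstLoop (ls : List String) (a : String)
    (acc : List (PySem.Dict String String)) :
    (ls.foldl
      (fun (st : PySem.Dict String String × List (PySem.Dict String String)) lesson =>
        let pack := st.1.insert "Lesson" lesson
        (pack, st.2 ++ [pack]))
      (PySem.Dict.ofList [("Lesson", a)], acc)).2 = acc ++ ls.map pvRow := by
  induction ls generalizing a acc with
  | nil => simp
  | cons l t ih =>
      simp only [List.foldl_cons, List.map_cons]
      rw [pvRow_eq]
      have : (pvRow l) = PySem.Dict.ofList [("Lesson", l)] := rfl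
      rw [this, ih l (acc ++ [PySem.Dict.ofList [("Lesson", l)]])]
      simp

theorem pvUpd_upd (e e' : String) (d : PySem.Dict String String) :
    pvUpd e' (pvUpd e d) = pvUpd e' d := by
  unfold pvUpd
  rw [PySem.Dict.getD_insert_of_ne _ _ _ (by decide),
      PySem.Dict.insert_insert_self]

theorem pvSecondLoop (exs : List String) (e : String)
    (cl : List (PySem.Dict String String)) :
    (e :: exs).foldl (fun cl exercise => cl.map (pvUpd exercise)) cl
      = cl.map (pvUpd ((e :: exs).getLast (by simp))) := by
  induction exs generalizing e cl with
  | nil => simp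
  | cons e' t ih =>
      simp only [List.foldl_cons]
      have h := ih e' (cl.map (pvUpd e))
      simp only [List.foldl_cons] at h
      rw [h, List.map_map]
      have hl : (e :: e' :: t).getLast (by simp) = (e' :: t).getLast (by simp) := by
        simp [List.getLast_cons]
      rw [hl]
      congr 1
      funext d
      exact pvUpd_upd e _ d

theorem pvRow_items (l : String) : (pvRow l).items = [("Lesson", l)] := by
  simp [pvRow, PySem.Dict.ofList, PySem.Dict.update, PySem.Dict.empty, PySem.Dict.insert,
    PySem.Dict.contains]

theorem pvUpd_row (e l : String) :
    (pvUpd e (pvRow l)).items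
      = [("Lesson", l), ("Exercise", if PySem.Str.isIn l e then e else "None")] := by
  unfold pvUpd
  rw [PySem.Dict.items_insert_of_not_contains _ _
    (by simp [PySem.Dict.contains, pvRow_items])]
  simp [pvRow_items, PySem.Dict.getD, PySem.Dict.get?]

theorem pvMain (E L : List String) :
    (E.foldl
      (fun cl exercise =>
        cl.map (fun d => d.insert "Exercise"
          (if PySem.Str.isIn (d.getD "Lesson" "None") exercise then exercise else "None")))
      (L.map pvRow)).map (fun d => d.items)
    = match E.getLast? with
      | none => L.map (fun lesson => [("Lesson", lesson)])
      | some last => L.map (fun lesson =>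
          [("Lesson", lesson),
           ("Exercise", if PySem.Str.isIn lesson last then last else "None")]) := by
  show (E.foldl (fun cl exercise => cl.map (pvUpd exercise)) (L.map pvRow)).map
      (fun d => d.items) = _
  cases E with
  | nil => simp [pvRow_items]
  | cons e t =>
      rw [pvSecondLoop, List.map_map, List.map_map,
        List.getLast?_eq_some_getLast (l := e :: t) (by simp)]
      simp only [Function.comp_def, pvUpd_row]

-- ===== VERDICT (by name: the statement is the Claim_ definition above) =====
theorem input_treatment_spec : Claim_equal_input_treatment := by
  intro s _
  unfold Spec_input_treatment input_treatment input_treatment_alt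
  simp only []
  rw [pvFirstLoop, List.nil_append, pvMain]
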